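-- pv_equiv track=rewrite | github.com/pypi-data/pypi-mirror-381 | packages/mfcqi/mfcqi-0.0.1-py3-none-any.whl/mfcqi/metrics/duplication.py | _count_sequence_occurrences
-- ===== SOURCE A (Python) =====
-- def _count_sequence_occurrences(
--     normalized_lines: list[str], sequence: list[str], seq_len: int
-- ) -> int:
--     """Count how many times a sequence appears."""
--     count = 0
--     for j in range(len(normalized_lines) - seq_len + 1):
--         if normalized_lines[j : j + seq_len] == sequence:
--             count += 1
--     return count
-- ===== SOURCE B (Python) =====
-- # Rabin-Karp: rolling polynomial hash over the window, full comparison only on a hash hit.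
-- _MOD = 2305843009213693951
-- _BASE = 131
--
--
-- def _val(s):
--     return sum(ord(c) for c in s)
--
--
-- def _hstep(a, v):
--     return (a * _BASE + v) % _MOD
--
--
-- def _count_sequence_occurrences(normalized_lines, sequence, seq_len):
--     n = len(normalized_lines)
--     if seq_len < 0:
--         return 0
--     if seq_len == 0:
--         # the empty window occurs at every one of the n + 1 positions
--         return n + 1 if not sequence else 0
--     if seq_len > n or len(sequence) != seq_len:
--         return 0
--     vals = [_val(s) for s in normalized_lines]
--     target = 0
--     for s in sequence:
--         target = _hstep(target, _val(s))
--     h = 0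
--     for v in vals[:seq_len]:
--         h = _hstep(h, v)
--     pw = pow(_BASE, seq_len - 1, _MOD)
--     count = 0
--     for j in range(n - seq_len):
--         if h == target and normalized_lines[j:j + seq_len] == sequence:
--             count += 1
--         h = _hstep(h - vals[j] * pw, vals[j + seq_len])
--     if h == target and normalized_lines[n - seq_len:] == sequence:
--         count += 1
--     return count
-- ===== Notes on version B (the rewrite author's own statement) =====
-- stated objective: faster
-- what changed: Replaces the per-position slice-and-compare scan with Rabin-Karp rolling-hash matching (full comparison only on a hash hit), plus direct closed forms for the degenerate window lengths.
-- outside the precondition, e.g. on _count_sequence_occurrences(['a', 'b'], ['a'], -1): A returns 1, B returns 0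
import Mathlib
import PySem

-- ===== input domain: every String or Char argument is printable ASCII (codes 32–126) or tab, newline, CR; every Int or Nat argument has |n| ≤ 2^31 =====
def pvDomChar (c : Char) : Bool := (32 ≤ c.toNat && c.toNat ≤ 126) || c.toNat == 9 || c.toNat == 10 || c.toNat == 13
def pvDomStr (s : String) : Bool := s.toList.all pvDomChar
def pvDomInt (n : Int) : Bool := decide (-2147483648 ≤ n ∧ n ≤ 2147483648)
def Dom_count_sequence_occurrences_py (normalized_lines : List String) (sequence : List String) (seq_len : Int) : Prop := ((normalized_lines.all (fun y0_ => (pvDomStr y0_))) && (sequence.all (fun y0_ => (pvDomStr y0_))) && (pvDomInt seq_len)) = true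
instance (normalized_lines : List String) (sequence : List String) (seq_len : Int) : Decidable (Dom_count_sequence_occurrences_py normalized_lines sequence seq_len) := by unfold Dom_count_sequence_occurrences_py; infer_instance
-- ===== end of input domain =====

-- B replaces A's per-position slice-and-compare scan by Rabin-Karp rolling-hash matching (faster in a timing run).

-- ===== PORT A =====
def count_sequence_occurrences_py (normalized_lines : List String) (sequence : List String) (seq_len : Int) : Int :=
  (PySem.List.pyRange 0 ((normalized_lines.length : Int) - seq_len + 1) 1).foldl
    (fun count j =>
      if PySem.List.slice normalized_lines (some j) (some (j + seq_len)) = sequence then count + 1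
      else count) 0

-- ===== PORT B =====
-- helper _val: sum(ord(c) for c in s)
def pvVal (s : String) : Int := s.toList.foldl (fun a c => a + (c.toNat : Int)) 0
-- helper _hstep: (a * _BASE + v) % _MOD
def pvHstep (a v : Int) : Int := PySem.Int.mod (a * 131 + v) 2305843009213693951

def count_sequence_occurrences_py_alt (normalized_lines : List String) (sequence : List String) (seq_len : Int) : Int :=
  let n : Int := (normalized_lines.length : Int)
  if seq_len < 0 then 0
  else if seq_len = 0 then (if sequence = [] then n + 1 else 0)
  else if n < seq_len ∨ (sequence.length : Int) ≠ seq_len then 0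
  else
    let vals := normalized_lines.map pvVal
    let target := sequence.foldl (fun t s => pvHstep t (pvVal s)) 0
    let h0 := (PySem.List.slice vals (some 0) (some seq_len)).foldl (fun a v => pvHstep a v) 0
    let pw := PySem.Int.powMod 131 (seq_len - 1).toNat 2305843009213693951
    let r := (PySem.List.pyRange 0 (n - seq_len) 1).foldl
      (fun (st : Int × Int) j =>
        (pvHstep (st.1 - PySem.List.pyGetD vals j 0 * pw) (PySem.List.pyGetD vals (j + seq_len) 0),
         if st.1 = target ∧ PySem.List.slice normalized_lines (some j) (some (j + seq_len)) = sequence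
         then st.2 + 1 else st.2))
      (h0, 0)
    if r.1 = target ∧ PySem.List.slice normalized_lines (some (n - seq_len)) none = sequence
    then r.2 + 1 else r.2

-- ===== PRECONDITION & SPEC =====
-- Pre_ excludes negative seq_len, where A's slice stop j+seq_len wraps around as a Python
-- negative index so A counts accidental wrapped windows; B returns 0 there.
def Pre_count_sequence_occurrences_py (normalized_lines : List String) (sequence : List String) (seq_len : Int) : Prop := 0 ≤ seq_len
instance (normalized_lines : List String) (sequence : List String) (seq_len : Int) : Decidable (Pre_count_sequence_occurrences_py normalized_lines sequence seq_len) := by unfold Pre_count_sequence_occurrences_py; infer_instance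

def pvWitness_count_sequence_occurrences_py : List String × List String × Int := (["a", "b", "a"], ["a"], 1)

def Spec_count_sequence_occurrences_py (normalized_lines : List String) (sequence : List String) (seq_len : Int) (out : Int) : Prop := out = count_sequence_occurrences_py_alt normalized_lines sequence seq_len
instance (normalized_lines : List String) (sequence : List String) (seq_len : Int) (out : Int) : Decidable (Spec_count_sequence_occurrences_py normalized_lines sequence seq_len out) := by unfold Spec_count_sequence_occurrences_py; infer_instance

-- ===== CLAIM (what is proved, stated in full; the proofs are below) =====
def Claim_equal_count_sequence_occurrences_py : Prop := ∀ (normalized_lines : List String) (sequence : List String) (seq_len : Int), Dom_count_sequence_occurrences_py normalized_lines sequence seq_len → Pre_count_sequence_occurrences_py normalized_lines sequence seq_len → Spec_count_sequence_occurrences_py normalized_lines sequence seq_len (count_sequence_occurrences_py normalized_lines sequence seq_len)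

-- ===== LEMMAS AND PROOFS =====

-- the un-modded polynomial value of a hashed window
def pvPoly : List Int → Int
  | [] => 0
  | v :: ws => v * 131 ^ ws.length + pvPoly ws

theorem pvHstep_eq (a v : Int) : pvHstep a v = (a * 131 + v) % 2305843009213693951 := by
  unfold pvHstep
  exact PySem.Int.mod_eq_emod_of_pos (by norm_num)

theorem pvHstep_mod (a v : Int) :
    pvHstep (a % 2305843009213693951) v = pvHstep a v := by
  rw [pvHstep_eq, pvHstep_eq]
  have h1 : Int.ModEq 2305843009213693951 (a % 2305843009213693951) a :=
    Int.emod_emod_of_dvd a dvd_rfl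
  exact (h1.mul_right 131).add_right v

theorem pvRoll (ws : List Int) (a : Int) :
    ws.foldl pvHstep (a % 2305843009213693951)
      = (a * 131 ^ ws.length + pvPoly ws) % 2305843009213693951 := by
  induction ws generalizing a with
  | nil => simp [pvPoly]
  | cons v ws ih =>
    simp only [List.foldl_cons, pvPoly, List.length_cons]
    rw [pvHstep_mod, pvHstep_eq, ih (a * 131 + v)]
    congr 1
    ring

theorem pvRoll0 (ws : List Int) :
    ws.foldl pvHstep 0 = pvPoly ws % 2305843009213693951 := by
  have h := pvRoll ws 0
  simpa using h

theorem pvPoly_append (ws : List Int) (x : Int) :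
    pvPoly (ws ++ [x]) = pvPoly ws * 131 + x := by
  induction ws with
  | nil => simp [pvPoly]
  | cons v ws ih =>
    simp only [List.cons_append, pvPoly, List.length_append, List.length_cons, List.length_nil, ih, pow_add, pow_one]
    ring

-- the rolling-hash update is exact
theorem pvUpdate (v : Int) (rest : List Int) (x : Int) :
    (rest ++ [x]).foldl pvHstep 0
      = pvHstep ((v :: rest).foldl pvHstep 0
                  - v * PySem.Int.powMod 131 rest.length 2305843009213693951) x := by
  rw [pvRoll0, pvRoll0, pvPoly_append, pvHstep_eq]
  unfold PySem.Int.powMod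
  rw [PySem.Int.mod_eq_emod_of_pos (by norm_num)]
  have h1 : Int.ModEq 2305843009213693951 (pvPoly (v :: rest) % 2305843009213693951) (pvPoly (v :: rest)) :=
    Int.emod_emod_of_dvd _ dvd_rfl
  have h2 : Int.ModEq 2305843009213693951 ((131 : Int) ^ rest.length % 2305843009213693951) ((131 : Int) ^ rest.length) :=
    Int.emod_emod_of_dvd _ dvd_rfl
  have h3 := ((h1.sub (h2.mul_left v)).mul_right 131).add_right x
  rw [show pvPoly (v :: rest) - v * 131 ^ rest.length = pvPoly rest by simp [pvPoly]] at h3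
  exact h3.symm

theorem pv_window_cons {α : Type} (xs : List α) (k m : Nat) (hk : k < xs.length) :
    (xs.drop k).take (m + 1) = xs[k] :: ((xs.drop (k + 1)).take m) := by
  rw [List.drop_eq_getElem_cons hk, List.take_succ_cons]

theorem pv_window_snoc {α : Type} (xs : List α) (k m : Nat) (hk : k + 1 + m < xs.length) :
    (xs.drop (k + 1)).take (m + 1) = (xs.drop (k + 1)).take m ++ [xs[k + 1 + m]] := by
  rw [List.take_add_one]
  have hlt : m < (xs.drop (k + 1)).length := by
    simp [List.length_drop]; omega
  rw [List.getElem?_eq_getElem hlt, List.getElem_drop]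
  simp

theorem pv_slice_nil {α : Type} (xs : List α) (j : Int) :
    PySem.List.slice xs (some j) (some (j + 0)) = [] := by
  apply List.eq_nil_of_length_eq_zero
  rw [PySem.List.length_slice]
  simp

-- the main loop invariant: B's fold over the first k window positions
theorem pvLoop (lines seq : List String) (target pw : Int) (m : Nat)
    (hpw : pw = PySem.Int.powMod 131 m 2305843009213693951)
    (htar : target = (seq.map pvVal).foldl pvHstep 0)
    (k : Nat) (hk : k + (m + 1) ≤ lines.length) :
    (PySem.List.pyRange 0 (k : Int) 1).foldl
      (fun (st : Int × Int) j =>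
        (pvHstep (st.1 - PySem.List.pyGetD (lines.map pvVal) j 0 * pw)
                 (PySem.List.pyGetD (lines.map pvVal) (j + ((m + 1 : Nat) : Int)) 0),
         if st.1 = target ∧
            PySem.List.slice lines (some j) (some (j + ((m + 1 : Nat) : Int))) = seq
         then st.2 + 1 else st.2))
      ((((lines.map pvVal).drop 0).take (m + 1)).foldl pvHstep 0, 0)
    = ((((lines.map pvVal).drop k).take (m + 1)).foldl pvHstep 0,
       ((List.range k).countP (fun j => decide ((lines.drop j).take (m + 1) = seq)) : Int)) := by
  induction k with
  | zero =>
    rw [show ((0 : Nat) : Int) = 0 by rfl, PySem.List.pyRange_one_eq_nil le_rfl]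
    simp
  | succ k ih =>
    have hk' : k + (m + 1) ≤ lines.length := by omega
    have hkv : k < (lines.map pvVal).length := by rw [List.length_map]; omega
    have hkv2 : k + 1 + m < (lines.map pvVal).length := by rw [List.length_map]; omega
    rw [show (((k + 1 : Nat)) : Int) = (k : Int) + 1 by push_cast; ring,
        PySem.List.pyRange_one_succ_right (Int.natCast_nonneg k), List.foldl_append, ih hk']
    simp only [List.foldl_cons, List.foldl_nil]
    have hget1 : PySem.List.pyGetD (lines.map pvVal) ((k : Int)) 0 = (lines.map pvVal)[k] := by
      rw [PySem.List.pyGetD_natCast, List.getD_eq_getElem _ _ hkv]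
    have hget2 : PySem.List.pyGetD (lines.map pvVal) ((k : Int) + ((m + 1 : Nat) : Int)) 0
        = (lines.map pvVal)[k + 1 + m] := by
      rw [show (k : Int) + ((m + 1 : Nat) : Int) = ((k + 1 + m : Nat) : Int) by push_cast; ring,
          PySem.List.pyGetD_natCast, List.getD_eq_getElem _ _ hkv2]
    have hslice : PySem.List.slice lines (some (k : Int)) (some ((k : Int) + ((m + 1 : Nat) : Int)))
        = (lines.drop k).take (m + 1) := by
      rw [show (k : Int) + ((m + 1 : Nat) : Int) = ((k + (m + 1) : Nat) : Int) by push_cast; ring,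
          PySem.List.slice_natCast]
      congr 1
      omega
    have hHw : (lines.drop k).take (m + 1) = seq →
        (((lines.map pvVal).drop k).take (m + 1)).foldl pvHstep 0 = target := by
      intro hw
      rw [htar, ← hw, ← List.map_drop, ← List.map_take, List.foldl_map]
    have hrestlen : ((((lines.map pvVal)).drop (k + 1)).take m).length = m := by
      rw [List.length_take, List.length_drop, List.length_map]
      omega
    have hup : pvHstep ((((lines.map pvVal).drop k).take (m + 1)).foldl pvHstep 0
                  - (lines.map pvVal)[k] * pw) ((lines.map pvVal)[k + 1 + m])
        = (((lines.map pvVal).drop (k + 1)).take (m + 1)).foldl pvHstep 0 := by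
      rw [pv_window_cons _ k m hkv, pv_window_snoc _ k m hkv2,
          pvUpdate ((lines.map pvVal)[k]) (((lines.map pvVal).drop (k + 1)).take m)
            ((lines.map pvVal)[k + 1 + m]), hrestlen, hpw]
    rw [hget1, hget2, hslice]
    refine Prod.ext ?_ ?_
    · exact hup
    · simp only [List.range_succ, List.countP_append]
      by_cases hw : (lines.drop k).take (m + 1) = seq
      · simp [hw, hHw hw]
      · simp [hw]

theorem pv_main (lines seq : List String) (L : Int) (hpre : 0 ≤ L) :
    count_sequence_occurrences_py lines seq L = count_sequence_occurrences_py_alt lines seq L := by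
  unfold count_sequence_occurrences_py count_sequence_occurrences_py_alt
  dsimp only
  rw [if_neg (by omega : ¬ L < 0)]
  by_cases hL0 : L = 0
  · subst hL0
    rw [if_pos rfl]
    simp only [pv_slice_nil, sub_zero]
    by_cases hseq : seq = []
    · rw [if_pos hseq]
      subst hseq
      simp only [if_true]
      rw [PySem.List.foldl_add (PySem.List.pyRange 0 ((lines.length : Int) + 1)) (fun _ => (1 : Int)) 0]
      rw [PySem.List.sum_map_const_int, PySem.List.length_pyRange_one]
      omega
    · rw [if_neg hseq]
      have hne : ¬(([] : List String) = seq) := fun h => hseq h.symm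
      simp [hne]
  · rw [if_neg hL0]
    have hLpos : 0 < L := by omega
    by_cases hbig : (lines.length : Int) < L
    · rw [if_pos (Or.inl hbig), PySem.List.pyRange_one_eq_nil (by omega)]
      simp
    · by_cases hlen : (seq.length : Int) ≠ L
      · rw [if_pos (Or.inr hlen)]
        rw [PySem.List.foldl_congr_mem _ _ (fun (c : Int) (_ : Int) => c) 0 ?_]
        · simp
        · intro acc j hj
          rw [PySem.List.mem_pyRange_one] at hj
          have hsl : (PySem.List.slice lines (some j) (some (j + L))).length = L.toNat := by
            rw [PySem.List.slice_toNat lines hj.1 (by omega)]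
            rw [List.length_take, List.length_drop]
            omega
          rw [if_neg ?_]
          intro h
          apply hlen
          rw [← h] at *
          omega
      · rw [if_neg (by tauto)]
        push_neg at hbig hlen
        -- main case: 1 ≤ L ≤ n and seq has window length
        obtain ⟨m, hm⟩ : ∃ m : Nat, L = ((m + 1 : Nat) : Int) :=
          ⟨L.toNat - 1, by omega⟩
        subst hm
        obtain ⟨k0, hk0⟩ : ∃ k0 : Nat, lines.length = k0 + (m + 1) :=
          ⟨lines.length - (m + 1), by omega⟩
        -- A side: turn the scan into a count over List.range (k0 + 1)
        have hrange1 : (lines.length : Int) - ((m + 1 : Nat) : Int) + 1 = ((k0 + 1 : Nat) : Int) := by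
          push_cast
          omega
        rw [hrange1, PySem.List.pyRange_zero_nat, List.foldl_map]
        rw [PySem.List.foldl_congr_mem _ _
          (fun (c : Int) (k : Nat) =>
            if (fun k => decide ((lines.drop k).take (m + 1) = seq)) k = true then c + 1 else c) 0 ?_]
        · rw [PySem.List.foldl_count_if, List.range_succ, List.countP_append]
          -- B side
          have hidx : (lines.length : Int) - ((m + 1 : Nat) : Int) = ((k0 : Nat) : Int) := by
            push_cast
            omega
          have hslice0 : PySem.List.slice (lines.map pvVal) (some 0) (some ((m + 1 : Nat) : Int))
              = ((lines.map pvVal).drop 0).take (m + 1) := by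
            rw [PySem.List.slice_zero_start, PySem.List.slice_to_natCast, List.drop_zero]
          have htoNat : ((((m + 1 : Nat) : Int)) - 1).toNat = m := by omega
          rw [hidx, htoNat, hslice0]
          rw [pvLoop lines seq (seq.foldl (fun t s => pvHstep t (pvVal s)) 0)
                (PySem.Int.powMod 131 m 2305843009213693951) m rfl List.foldl_map.symm k0 (by omega)]
          have hfin : PySem.List.slice lines (some ((k0 : Nat) : Int)) none
              = (lines.drop k0).take (m + 1) := by
            rw [PySem.List.slice_from_natCast]
            exact (List.take_of_length_le (by rw [List.length_drop]; omega)).symm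
          have hHw0 : (lines.drop k0).take (m + 1) = seq →
              (((lines.map pvVal).drop k0).take (m + 1)).foldl pvHstep 0
                = seq.foldl (fun t s => pvHstep t (pvVal s)) 0 := by
            intro hw
            rw [← hw, ← List.map_drop, ← List.map_take, List.foldl_map]
          rw [hfin]
          by_cases hw : (lines.drop k0).take (m + 1) = seq
          · rw [if_pos ⟨hHw0 hw, hw⟩]
            simp [hw]
          · rw [if_neg (fun h => hw h.2)]
            simp [hw]
        · intro acc k hk
          have hsl : PySem.List.slice lines (some (k : Int)) (some ((k : Int) + ((m : Int) + 1)))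
              = (lines.drop k).take (m + 1) := by
            rw [show (k : Int) + ((m : Int) + 1) = ((k + (m + 1) : Nat) : Int) by push_cast; ring,
                PySem.List.slice_natCast]
            congr 1
            omega
          simp [hsl]

-- ===== VERDICT (by name: the statement is the Claim_ definition above) =====
theorem count_sequence_occurrences_py_spec : Claim_equal_count_sequence_occurrences_py := by
  intro lines seq L _ hpre
  unfold Spec_count_sequence_occurrences_py
  exact pv_main lines seq L hpre
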